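-- pv_equiv track=rewrite | github.com/microsoft/ML-For-Beginners | .venv/Lib/site-packages/scipy/signal/_signaltools.py | _inputs_swap_needed
-- ===== SOURCE A (Python) =====
-- def _inputs_swap_needed(mode, shape1, shape2, axes=None):
--     """Determine if inputs arrays need to be swapped in `"valid"` mode.
--
--     If in `"valid"` mode, returns whether or not the input arrays need to be
--     swapped depending on whether `shape1` is at least as large as `shape2` in
--     every calculated dimension.
--
--     This is important for some of the correlation and convolution
--     implementations in this module, where the larger array input needs to come
--     before the smaller array input when operating in this mode.
--
--     Note that if the mode provided is not 'valid', False is immediately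
--     returned.
--
--     """
--     if mode != 'valid':
--         return False
--
--     if not shape1:
--         return False
--
--     if axes is None:
--         axes = range(len(shape1))
--
--     ok1 = all(shape1[i] >= shape2[i] for i in axes)
--     ok2 = all(shape2[i] >= shape1[i] for i in axes)
--
--     if not (ok1 or ok2):
--         raise ValueError("For 'valid' mode, one must be at least "
--                          "as large as the other in every dimension")
--
--     return not ok1
-- ===== SOURCE B (Python) =====
-- def _inputs_swap_needed(mode, shape1, shape2, axes=None):
--     if mode != 'valid' or not shape1:
--         return False
--     if axes is None:
--         axes = range(len(shape1))
--     # single pass keeping a three-valued ordering verdict: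
--     # 0 = all equal so far, 1 = shape1 strictly larger somewhere, -1 = strictly smaller somewhere
--     verdict = 0
--     for i in axes:
--         d = shape1[i] - shape2[i]
--         if d:
--             s = -1 if d < 0 else 1
--             if verdict and s != verdict:
--                 raise ValueError("For 'valid' mode, one must be at least "
--                                  "as large as the other in every dimension")
--             verdict = s
--     return verdict < 0
-- ===== Notes on version B (the rewrite author's own statement) =====
-- stated objective: alternative
-- what changed: Replaces the two separate all() generator scans with a single pass that keeps a three-valued ordering verdict (equal/larger/smaller), raising the same ValueError on the first conflicting axis and returning whether the verdict is 'smaller'.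
import Mathlib
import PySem

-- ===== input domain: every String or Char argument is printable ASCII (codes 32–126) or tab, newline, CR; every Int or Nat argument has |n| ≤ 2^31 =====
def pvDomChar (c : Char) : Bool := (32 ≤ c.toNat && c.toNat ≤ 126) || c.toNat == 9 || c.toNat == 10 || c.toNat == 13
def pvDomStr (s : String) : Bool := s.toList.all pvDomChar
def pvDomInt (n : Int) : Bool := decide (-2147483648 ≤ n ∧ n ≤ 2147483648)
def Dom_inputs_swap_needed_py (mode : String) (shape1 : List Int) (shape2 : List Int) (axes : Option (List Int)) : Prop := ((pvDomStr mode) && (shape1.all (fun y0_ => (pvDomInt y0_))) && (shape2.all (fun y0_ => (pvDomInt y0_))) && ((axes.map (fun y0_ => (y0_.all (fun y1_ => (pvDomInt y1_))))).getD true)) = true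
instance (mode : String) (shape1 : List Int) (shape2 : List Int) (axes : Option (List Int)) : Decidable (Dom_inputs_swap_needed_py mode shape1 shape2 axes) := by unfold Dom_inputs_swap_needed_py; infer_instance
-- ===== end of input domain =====

-- B replaces A's two all() scans by one pass carrying a three-valued ordering verdict; objective: alternative.
-- Where Python raises (IndexError from an out-of-range axis, or the ValueError when neither
-- shape dominates) both A and B raise; those inputs are excluded by Pre_ below.

-- ===== PORT A =====
-- shape1[i] >= shape2[i] as A's generator computes it (false outside Pre_, where Python raises IndexError)
def pvAxGe (s1 s2 : List Int) (i : Int) : Bool :=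
  match PySem.List.pyGet? s1 i, PySem.List.pyGet? s2 i with
  | some a, some b => decide (b ≤ a)
  | _, _ => false

def inputs_swap_needed_py (mode : String) (shape1 : List Int) (shape2 : List Int) (axes : Option (List Int)) : Bool :=
  if mode ≠ "valid" then false
  else if shape1 = [] then false
  else
    let ax := match axes with
      | none => PySem.List.pyRange 0 shape1.length 1
      | some l => l
    let ok1 := ax.all (fun i => pvAxGe shape1 shape2 i)
    let ok2 := ax.all (fun i => pvAxGe shape2 shape1 i)
    if !(ok1 || ok2) then false   -- Python: raise ValueError (excluded by Pre_)
    else !ok1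

-- ===== PORT B =====
-- B's single loop as structural recursion over the axes, carrying the verdict v;
-- none = the loop raises (ValueError on a conflicting axis, IndexError on a bad index)
def pvVerdict (s1 s2 : List Int) : List Int → Int → Option Int
  | [], v => some v
  | i :: rest, v =>
    match PySem.List.pyGet? s1 i, PySem.List.pyGet? s2 i with
    | some a, some b =>
      if a - b ≠ 0 then
        let s : Int := if a - b < 0 then -1 else 1
        if v ≠ 0 ∧ s ≠ v then none
        else pvVerdict s1 s2 rest s
      else pvVerdict s1 s2 rest v
    | _, _ => none   -- Python: IndexError (excluded by Pre_)

def inputs_swap_needed_py_alt (mode : String) (shape1 : List Int) (shape2 : List Int) (axes : Option (List Int)) : Bool :=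
  if mode ≠ "valid" ∨ shape1 = [] then false
  else
    let ax := match axes with
      | none => PySem.List.pyRange 0 shape1.length 1
      | some l => l
    match pvVerdict shape1 shape2 ax 0 with
    | some v => decide (v < 0)
    | none => false   -- Python: raise (excluded by Pre_)

-- ===== PRECONDITION & SPEC =====
-- Pre_ excludes exactly the inputs on which A raises: an axis index out of Python range for
-- either shape (IndexError), or neither shape ≥ the other on all axes (the ValueError).
def Pre_inputs_swap_needed_py (mode : String) (shape1 : List Int) (shape2 : List Int) (axes : Option (List Int)) : Prop :=
  mode ≠ "valid" ∨ shape1 = [] ∨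
  (let ax := match axes with
      | none => PySem.List.pyRange 0 shape1.length 1
      | some l => l
   (∀ i ∈ ax, (PySem.List.pyGet? shape1 i).isSome ∧ (PySem.List.pyGet? shape2 i).isSome) ∧
   ((∀ i ∈ ax, PySem.List.pyGetD shape2 i 0 ≤ PySem.List.pyGetD shape1 i 0) ∨
    (∀ i ∈ ax, PySem.List.pyGetD shape1 i 0 ≤ PySem.List.pyGetD shape2 i 0)))

instance (mode : String) (shape1 : List Int) (shape2 : List Int) (axes : Option (List Int)) : Decidable (Pre_inputs_swap_needed_py mode shape1 shape2 axes) := by unfold Pre_inputs_swap_needed_py; infer_instance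

def pvWitness_inputs_swap_needed_py : String × List Int × List Int × Option (List Int) := ("valid", [3, 4], [2, 2], none)

def Spec_inputs_swap_needed_py (mode : String) (shape1 : List Int) (shape2 : List Int) (axes : Option (List Int)) (out : Bool) : Prop := out = inputs_swap_needed_py_alt mode shape1 shape2 axes
instance (mode : String) (shape1 : List Int) (shape2 : List Int) (axes : Option (List Int)) (out : Bool) : Decidable (Spec_inputs_swap_needed_py mode shape1 shape2 axes out) := by unfold Spec_inputs_swap_needed_py; infer_instance

-- ===== CLAIM (what is proved, stated in full; the proofs are below) =====
def Claim_equal_inputs_swap_needed_py : Prop := ∀ (mode : String) (shape1 : List Int) (shape2 : List Int) (axes : Option (List Int)), Dom_inputs_swap_needed_py mode shape1 shape2 axes → Pre_inputs_swap_needed_py mode shape1 shape2 axes → Spec_inputs_swap_needed_py mode shape1 shape2 axes (inputs_swap_needed_py mode shape1 shape2 axes)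

-- ===== LEMMAS AND PROOFS =====

-- pointwise value of A's generator predicate when both indexings succeed
theorem pvAxGe_eq (s1 s2 : List Int) (i : Int)
    (h1 : (PySem.List.pyGet? s1 i).isSome) (h2 : (PySem.List.pyGet? s2 i).isSome) :
    pvAxGe s1 s2 i = decide (PySem.List.pyGetD s2 i 0 ≤ PySem.List.pyGetD s1 i 0) := by
  obtain ⟨a, ha⟩ := Option.isSome_iff_exists.mp h1
  obtain ⟨b, hb⟩ := Option.isSome_iff_exists.mp h2
  simp [pvAxGe, PySem.List.pyGetD, ha, hb]

theorem pvAllCongr {l : List Int} {p q : Int → Bool} (h : ∀ a ∈ l, p a = q a) : l.all p = l.all q := by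
  induction l with
  | nil => rfl
  | cons x xs ih =>
    simp only [List.all_cons, h x List.mem_cons_self,
      ih (fun a ha => h a (List.mem_cons_of_mem _ ha))]

-- when shape1 dominates on every axis, the verdict stays in {0,1}
theorem pvVerdict_ge (s1 s2 : List Int) (ax : List Int)
    (hin : ∀ i ∈ ax, (PySem.List.pyGet? s1 i).isSome ∧ (PySem.List.pyGet? s2 i).isSome)
    (hdom : ∀ i ∈ ax, PySem.List.pyGetD s2 i 0 ≤ PySem.List.pyGetD s1 i 0) :
    ∀ v : Int, v = 0 ∨ v = 1 →
      pvVerdict s1 s2 ax v =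
        some (if ax.any (fun i => decide (PySem.List.pyGetD s2 i 0 < PySem.List.pyGetD s1 i 0)) then 1 else v) := by
  induction ax with
  | nil => intro v _; simp [pvVerdict]
  | cons x rest ih =>
    intro v hv
    obtain ⟨h1, h2⟩ := hin x List.mem_cons_self
    obtain ⟨a, ha⟩ := Option.isSome_iff_exists.mp h1
    obtain ⟨b, hb⟩ := Option.isSome_iff_exists.mp h2
    have hd : b ≤ a := by
      have := hdom x List.mem_cons_self
      simpa [PySem.List.pyGetD, ha, hb] using this
    have ih' := ih (fun i hi => hin i (List.mem_cons_of_mem _ hi))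
      (fun i hi => hdom i (List.mem_cons_of_mem _ hi))
    by_cases hne : a - b ≠ 0
    · have hlt : b < a := lt_of_le_of_ne hd (by omega)
      have hnotlt : ¬ (a - b < 0) := by omega
      have hnoconf : ¬ (v ≠ 0 ∧ (1 : Int) ≠ v) := by rcases hv with rfl | rfl <;> simp
      simp only [pvVerdict, ha, hb, if_pos hne, hnotlt, if_false, hnoconf]
      rw [ih' 1 (Or.inr rfl)]
      simp [List.any_cons, PySem.List.pyGetD, ha, hb, hlt]
    · have heq : a = b := by omega
      simp only [pvVerdict, ha, hb, if_neg hne]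
      rw [ih' v hv]
      simp [List.any_cons, PySem.List.pyGetD, ha, hb, heq]
  -- (the head contributes no strict comparison when a = b)

-- when shape2 dominates on every axis, the verdict stays in {0,-1}
theorem pvVerdict_le (s1 s2 : List Int) (ax : List Int)
    (hin : ∀ i ∈ ax, (PySem.List.pyGet? s1 i).isSome ∧ (PySem.List.pyGet? s2 i).isSome)
    (hdom : ∀ i ∈ ax, PySem.List.pyGetD s1 i 0 ≤ PySem.List.pyGetD s2 i 0) :
    ∀ v : Int, v = 0 ∨ v = -1 →
      pvVerdict s1 s2 ax v =
        some (if ax.any (fun i => decide (PySem.List.pyGetD s1 i 0 < PySem.List.pyGetD s2 i 0)) then -1 else v) := by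
  induction ax with
  | nil => intro v _; simp [pvVerdict]
  | cons x rest ih =>
    intro v hv
    obtain ⟨h1, h2⟩ := hin x List.mem_cons_self
    obtain ⟨a, ha⟩ := Option.isSome_iff_exists.mp h1
    obtain ⟨b, hb⟩ := Option.isSome_iff_exists.mp h2
    have hd : a ≤ b := by
      have := hdom x List.mem_cons_self
      simpa [PySem.List.pyGetD, ha, hb] using this
    have ih' := ih (fun i hi => hin i (List.mem_cons_of_mem _ hi))
      (fun i hi => hdom i (List.mem_cons_of_mem _ hi))
    by_cases hne : a - b ≠ 0
    · have hlt : a < b := lt_of_le_of_ne hd (by omega)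
      have hltd : a - b < 0 := by omega
      have hnoconf : ¬ (v ≠ 0 ∧ (-1 : Int) ≠ v) := by rcases hv with rfl | rfl <;> simp
      simp only [pvVerdict, ha, hb, if_pos hne, if_pos hltd, hnoconf, if_false]
      rw [ih' (-1) (Or.inr rfl)]
      simp [List.any_cons, PySem.List.pyGetD, ha, hb, hlt]
    · have heq : a = b := by omega
      simp only [pvVerdict, ha, hb, if_neg hne]
      rw [ih' v hv]
      simp [List.any_cons, PySem.List.pyGetD, ha, hb, heq]

-- ===== VERDICT (by name: the statement is the Claim_ definition above) =====
theorem inputs_swap_needed_py_spec : Claim_equal_inputs_swap_needed_py := by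
  intro mode shape1 shape2 axes _ hpre
  unfold Spec_inputs_swap_needed_py inputs_swap_needed_py inputs_swap_needed_py_alt
  by_cases hm : mode ≠ "valid"
  · simp [hm]
  by_cases hs : shape1 = []
  · simp [hm, hs]
  simp only [hm, hs, if_false, or_self]
  rcases hpre with h | h | hpre
  · exact absurd h hm
  · exact absurd h hs
  simp only at hpre
  obtain ⟨hin, hok⟩ := hpre
  set ax := (match axes with
      | none => PySem.List.pyRange 0 shape1.length 1
      | some l => l) with hax
  have hall1 : ax.all (fun i => pvAxGe shape1 shape2 i)
      = ax.all (fun i => decide (PySem.List.pyGetD shape2 i 0 ≤ PySem.List.pyGetD shape1 i 0)) :=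
    pvAllCongr (fun i hi => pvAxGe_eq shape1 shape2 i (hin i hi).1 (hin i hi).2)
  have hall2 : ax.all (fun i => pvAxGe shape2 shape1 i)
      = ax.all (fun i => decide (PySem.List.pyGetD shape1 i 0 ≤ PySem.List.pyGetD shape2 i 0)) :=
    pvAllCongr (fun i hi => pvAxGe_eq shape2 shape1 i (hin i hi).2 (hin i hi).1)
  rcases hok with hok | hok
  · -- shape1 dominates: A returns !ok1 with ok1 = true; B's verdict is 0 or 1
    rw [pvVerdict_ge shape1 shape2 ax hin hok 0 (Or.inl rfl)]
    have h1 : ax.all (fun i => decide (PySem.List.pyGetD shape2 i 0 ≤ PySem.List.pyGetD shape1 i 0)) = true := by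
      simp only [List.all_eq_true, decide_eq_true_eq]; exact hok
    rw [hall1, h1]
    split_ifs <;> simp
  · -- shape2 dominates: A returns !ok1; B's verdict is -1 iff some axis is strictly smaller
    rw [pvVerdict_le shape1 shape2 ax hin hok 0 (Or.inl rfl)]
    have h2 : ax.all (fun i => pvAxGe shape2 shape1 i) = true := by
      rw [hall2]; simp only [List.all_eq_true, decide_eq_true_eq]; exact hok
    have h3 : ax.all (fun i => pvAxGe shape1 shape2 i)
        = !(ax.any (fun i => decide (PySem.List.pyGetD shape1 i 0 < PySem.List.pyGetD shape2 i 0))) := by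
      rw [hall1, List.all_eq_not_any_not]
      simp only [← decide_not, not_le]
    rw [h2, h3]
    cases ax.any (fun i => decide (PySem.List.pyGetD shape1 i 0 < PySem.List.pyGetD shape2 i 0)) <;> simp
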